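-- pv_equiv track=rewrite | github.com/oscody/graphrag | graph_docs.py | flatten_concepts
-- ===== SOURCE A (Python) =====
-- def flatten_concepts(concepts_dict):
--     flat_list = []
--
--     def recurse_terms(term_dict):
--         for term, narrower_terms in term_dict.items():
--             flat_list.append(term)
--             if narrower_terms:
--                 recurse_terms(dict.fromkeys(narrower_terms, []))  # Use an empty dict to recurse
--
--     recurse_terms(concepts_dict)
--     return flat_list
-- ===== SOURCE B (Python) =====
-- def flatten_concepts(concepts_dict):
--     return [x for term, narrower in concepts_dict.items()
--               for x in (term, *dict.fromkeys(narrower))]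
-- ===== Notes on version B (the rewrite author's own statement) =====
-- stated objective: idiomatic
-- what changed: Replaced the mutating recursive helper (which recurses into a dict built from the narrower terms) by a single flat comprehension that emits each term followed by its deduplicated narrower terms.
import Mathlib
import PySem

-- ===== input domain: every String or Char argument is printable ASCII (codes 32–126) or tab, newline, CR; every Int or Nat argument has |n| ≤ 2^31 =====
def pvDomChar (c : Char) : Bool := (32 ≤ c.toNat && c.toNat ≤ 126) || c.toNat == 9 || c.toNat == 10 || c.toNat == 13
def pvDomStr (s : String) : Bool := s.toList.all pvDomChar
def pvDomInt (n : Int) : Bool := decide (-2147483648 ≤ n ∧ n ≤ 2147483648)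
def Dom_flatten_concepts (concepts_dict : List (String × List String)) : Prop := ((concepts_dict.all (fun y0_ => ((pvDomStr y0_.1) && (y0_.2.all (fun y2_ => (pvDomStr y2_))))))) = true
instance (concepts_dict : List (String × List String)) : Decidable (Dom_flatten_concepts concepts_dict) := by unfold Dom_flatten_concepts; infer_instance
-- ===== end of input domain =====

-- ===== PORT A =====
-- B changes: a flat comprehension (term followed by its deduplicated narrower terms) replaces
-- A's mutating recursive helper; same output, same cost (objective: idiomatic).
-- literal transliteration of A's recursive helper; flat_list is threaded as an accumulator `acc`.
def pvRecurseTerms (acc : List String) : List (String × List String) → List String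
  | [] => acc
  | (term, narrower) :: rest =>
      -- flat_list.append(term); if narrower_terms: recurse_terms(dict.fromkeys(narrower_terms, []))
      let acc1 := acc ++ [term]
      let acc2 := if narrower ≠ [] then
          pvRecurseTerms acc1 ((PySem.List.dedup narrower).map (fun k => (k, ([] : List String))))
        else acc1
      pvRecurseTerms acc2 rest
termination_by l => l.length + (l.map (fun p => p.2.length)).sum
decreasing_by
  · have h1 : (PySem.List.dedup narrower).length ≤ narrower.length := by
      simpa [PySem.List.dedup_eq_ofList] using PySem.Set.length_ofList_le (xs := narrower)
    have h2 : (((PySem.List.dedup narrower).map (fun k => ((k, ([] : List String)) : String × List String))).map (fun p => p.2.length)).sum = 0 := by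
      simp [List.map_map, Function.comp_def]
    simp only [List.length_map, List.map_map, List.length_cons, List.map_cons, List.sum_cons] at *
    omega
  · simp; omega

def flatten_concepts (concepts_dict : List (String × List String)) : List String :=
  pvRecurseTerms [] concepts_dict

-- ===== PORT B =====
def flatten_concepts_alt (concepts_dict : List (String × List String)) : List String :=
  concepts_dict.flatMap (fun p => p.1 :: PySem.List.dedup p.2)

-- ===== PRECONDITION & SPEC =====
def Spec_flatten_concepts (concepts_dict : List (String × List String)) (out : List String) : Prop := out = flatten_concepts_alt concepts_dict
instance (concepts_dict : List (String × List String)) (out : List String) : Decidable (Spec_flatten_concepts concepts_dict out) := by unfold Spec_flatten_concepts; infer_instance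

-- ===== CLAIM (what is proved, stated in full; the proofs are below) =====
def Claim_equal_flatten_concepts : Prop := ∀ (concepts_dict : List (String × List String)), Dom_flatten_concepts concepts_dict → Spec_flatten_concepts concepts_dict (flatten_concepts concepts_dict)

-- ===== LEMMAS AND PROOFS =====

-- the inner recursion on dict.fromkeys(narrower, []): every value is [], so it just appends the keys
theorem pvRecurseTerms_keys (acc : List String) (ks : List String) :
    pvRecurseTerms acc (ks.map (fun k => (k, ([] : List String)))) = acc ++ ks := by
  induction ks generalizing acc with
  | nil => simp [pvRecurseTerms]
  | cons k rest ih => simp [pvRecurseTerms, ih]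

theorem pvRecurseTerms_eq (acc : List String) (l : List (String × List String)) :
    pvRecurseTerms acc l = acc ++ flatten_concepts_alt l := by
  induction l generalizing acc with
  | nil => simp [pvRecurseTerms, flatten_concepts_alt]
  | cons hd rest ih =>
      obtain ⟨term, narrower⟩ := hd
      by_cases h : narrower = []
      · subst h
        simp [pvRecurseTerms, ih, flatten_concepts_alt, PySem.List.dedup]
      · simp only [pvRecurseTerms, if_pos h, pvRecurseTerms_keys, ih, flatten_concepts_alt]
        simp

-- ===== VERDICT (by name: the statement is the Claim_ definition above) =====
theorem flatten_concepts_spec : Claim_equal_flatten_concepts := by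
  intro l _
  show flatten_concepts l = flatten_concepts_alt l
  simpa [flatten_concepts] using pvRecurseTerms_eq [] l
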